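-- pv_equiv track=rewrite | github.com/AitorsanchezGH/EstudioDAA | DivideYVenceras/ultimoElementoParDYVV2.py | DyV
-- ===== SOURCE A (Python) =====
-- def DyV(vector):
--     if (len(vector)==1):
--         if (vector[0]%2==0):
--             return 0
--         else:
--             return -1
--     else:
--         mitad = len (vector) // 2
--         if (vector[mitad]%2!=0): #SI ES IMPAR
--             return DyV(vector[0:mitad])
--         else:
--             pos = DyV(vector[mitad+1:])
--             if (pos==-1):
--                 return mitad
--             else:
--                 return pos + mitad + 1
-- ===== SOURCE B (Python) =====
-- def DyV(vector):
--     # Iterative binary descent over half-open index bounds with an accumulated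
--     # fallback answer, instead of A's recursion on copied slices.
--     lo, hi, ans = 0, len(vector), -1
--     while hi - lo > 1:
--         mid = lo + (hi - lo) // 2
--         if vector[mid] % 2 != 0:
--             hi = mid
--         else:
--             ans = mid
--             lo = mid + 1
--     if lo < hi and vector[lo] % 2 == 0:
--         return lo
--     return ans
-- ===== Notes on version B (the rewrite author's own statement) =====
-- stated objective: alternative
-- what changed: A's divide-and-conquer recursion on copied slices (with a result-relocation unwind pos+mitad+1) is replaced by a flat iterative binary descent over half-open index bounds lo/hi on the original list, carrying an accumulated fallback answer, so no sublists are ever built and no unwind arithmetic is needed.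
-- crash fix: A raises IndexError whenever its descent reaches an empty sub-vector (the empty input, or a length-2 sub-interval whose middle element is even); B instead returns the last even midpoint recorded on the descent (-1 if none). — e.g. on DyV([0, 0]): A raises IndexError, B returns 1
import Mathlib
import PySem

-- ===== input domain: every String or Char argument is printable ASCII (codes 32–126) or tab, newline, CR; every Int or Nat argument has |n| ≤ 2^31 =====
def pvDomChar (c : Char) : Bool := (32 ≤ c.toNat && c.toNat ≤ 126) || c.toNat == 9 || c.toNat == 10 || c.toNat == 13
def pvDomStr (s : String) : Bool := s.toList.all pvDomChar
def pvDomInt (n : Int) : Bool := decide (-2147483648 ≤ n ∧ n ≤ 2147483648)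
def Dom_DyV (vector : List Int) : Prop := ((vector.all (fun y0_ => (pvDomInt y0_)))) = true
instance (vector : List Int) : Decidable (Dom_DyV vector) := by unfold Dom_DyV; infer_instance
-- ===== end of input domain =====

-- B replaces A's recursion on copied slices by a flat iterative binary descent over index
-- bounds with an accumulated fallback answer (objective: alternative; return value only).

-- ===== PORT A =====
-- A's recursion, made total by a fuel argument (fuel = vector.length always suffices; the
-- 0-fuel and pyGet?-none junk values are reached only where Python raises, outside Pre_).
def DyVGo : Nat → List Int → Int
  | 0, _ => 0
  | fuel + 1, vector =>
    if vector.length = 1 then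
      match PySem.List.pyGet? vector 0 with
      | some x => if PySem.Int.mod x 2 = 0 then 0 else -1
      | none => 0   -- unreachable (length = 1)
    else
      let mitad : Int := PySem.Int.floordiv (vector.length : Int) 2
      match PySem.List.pyGet? vector mitad with
      | none => 0   -- Python raises IndexError here (empty vector); excluded by Pre_
      | some x =>
        if PySem.Int.mod x 2 ≠ 0 then
          DyVGo fuel (PySem.List.slice vector (some 0) (some mitad))
        else
          let pos := DyVGo fuel (PySem.List.slice vector (some (mitad + 1)) (some (vector.length : Int)))
          if pos = -1 then mitad else pos + mitad + 1

def DyV (vector : List Int) : Int := DyVGo vector.length vector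

-- ===== PORT B =====
-- the while loop of Source B: state (lo, hi, ans); fuel = vector.length bounds the iteration count
def DyVLoopGo (v : List Int) : Nat → Nat → Nat → Int → Int
  | 0, _, _, ans => ans   -- fuel exhausted: unreachable for fuel ≥ hi - lo
  | fuel + 1, lo, hi, ans =>
    if hi - lo > 1 then
      let mid := lo + (hi - lo) / 2
      if PySem.Int.mod (v.getD mid 0) 2 ≠ 0 then
        DyVLoopGo v fuel lo mid ans
      else
        DyVLoopGo v fuel (mid + 1) hi (mid : Int)
    else
      if lo < hi ∧ PySem.Int.mod (v.getD lo 0) 2 = 0 then (lo : Int) else ans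

def DyV_alt (vector : List Int) : Int := DyVLoopGo vector vector.length 0 vector.length (-1)

-- ===== PRECONDITION & SPEC =====
-- A raises IndexError exactly when its descent reaches an empty sub-vector (the empty input, or
-- a width-2 sub-interval whose middle element is even).  That crash set depends on the parities
-- met along the descent path and has no non-recursive characterisation, so Pre_ states the
-- descent-safety condition itself; it excludes NO input on which A returns a value.
def okDyVGo (v : List Int) : Nat → Nat → Nat → Bool
  | 0, lo, hi => decide (hi - lo = 1)
  | fuel + 1, lo, hi =>
    if hi - lo > 1 then
      let mid := lo + (hi - lo) / 2
      if PySem.Int.mod (v.getD mid 0) 2 ≠ 0 then okDyVGo v fuel lo mid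
      else if hi - lo = 2 then false else okDyVGo v fuel (mid + 1) hi
    else decide (lo < hi)

def Pre_DyV (vector : List Int) : Prop := okDyVGo vector vector.length 0 vector.length = true
instance (vector : List Int) : Decidable (Pre_DyV vector) := by unfold Pre_DyV; infer_instance
def pvWitness_DyV : List Int := [2, 1, 2]

-- A raises IndexError on the inputs where its descent hits an empty sub-vector; B returns the
-- last even midpoint recorded on the descent there (-1 if none).
def Raises_DyV (vector : List Int) : Prop := okDyVGo vector vector.length 0 vector.length = false
instance (vector : List Int) : Decidable (Raises_DyV vector) := by unfold Raises_DyV; infer_instance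
def pvRaiseWitness_DyV : List Int := [0, 0]
def pvRaiseWitnessOut_DyV : Int := 1

def Spec_DyV (vector : List Int) (out : Int) : Prop := out = DyV_alt vector
instance (vector : List Int) (out : Int) : Decidable (Spec_DyV vector out) := by unfold Spec_DyV; infer_instance

-- ===== CLAIM (what is proved, stated in full; the proofs are below) =====
def Claim_equal_DyV : Prop := ∀ (vector : List Int), Dom_DyV vector → Pre_DyV vector → Spec_DyV vector (DyV vector)
def Claim_raises_DyV : Prop := (∀ (vector : List Int), Dom_DyV vector → Raises_DyV vector → ¬ Pre_DyV vector) ∧ (Dom_DyV (pvRaiseWitness_DyV) ∧ Raises_DyV (pvRaiseWitness_DyV) ∧ DyV_alt (pvRaiseWitness_DyV) = pvRaiseWitnessOut_DyV)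

-- ===== LEMMAS AND PROOFS =====

-- the segment of v that A's recursion works on between the bounds lo and hi
def segDyV (v : List Int) (lo hi : Nat) : List Int := (v.drop lo).take (hi - lo)

theorem segDyV_length (v : List Int) (lo hi : Nat) (h : hi ≤ v.length) :
    (segDyV v lo hi).length = hi - lo := by
  simp [segDyV]; omega

theorem segDyV_getElem? (v : List Int) (lo hi i : Nat) (h1 : i < hi - lo) (h2 : hi ≤ v.length) :
    (segDyV v lo hi)[i]? = some (v.getD (lo + i) 0) := by
  have h3 : lo + i < v.length := by omega
  rw [segDyV, List.getElem?_take_of_lt h1, List.getElem?_drop]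
  rw [List.getD_eq_getElem?_getD, List.getElem?_eq_getElem h3]
  rfl

theorem segDyV_take (v : List Int) (lo hi m : Nat) (h : m ≤ hi - lo) :
    (segDyV v lo hi).take m = segDyV v lo (lo + m) := by
  simp [segDyV, List.take_take]; omega

theorem segDyV_drop (v : List Int) (lo hi m : Nat) :
    (segDyV v lo hi).drop m = segDyV v (lo + m) hi := by
  rw [segDyV, List.drop_take, List.drop_drop, segDyV]
  congr 1
  omega

theorem DyVGo_neg_one_or_nonneg (fuel : Nat) : ∀ (v : List Int), DyVGo fuel v = -1 ∨ 0 ≤ DyVGo fuel v := by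
  induction fuel with
  | zero => intro v; right; simp [DyVGo]
  | succ fuel ih =>
    intro v
    simp only [DyVGo]
    split
    · split
      · split <;> simp
      · simp
    · have hm : PySem.Int.floordiv ((v.length : Nat) : Int) 2 = ((v.length / 2 : Nat) : Int) := by
        exact_mod_cast PySem.Int.floordiv_natCast v.length 2
      rw [hm]
      split
      · simp
      · split
        · exact ih _
        · rcases ih (PySem.List.slice v (some (((v.length / 2 : Nat) : Int) + 1)) (some (v.length : Int))) with h | h <;>
            split <;> omega

-- main bridge: B's loop on bounds (lo, hi) computes A's answer on the segment, relocated by lo,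
-- with ans as the fallback for A's -1
theorem DyVLoopGo_eq_DyVGo_seg (fuel : Nat) : ∀ (lo hi : Nat) (ans : Int) (v : List Int),
    0 < hi - lo → hi - lo ≤ fuel → hi ≤ v.length → okDyVGo v fuel lo hi = true →
    DyVLoopGo v fuel lo hi ans =
      if DyVGo fuel (segDyV v lo hi) = -1 then ans else (lo : Int) + DyVGo fuel (segDyV v lo hi) := by
  induction fuel with
  | zero => intro lo hi ans v h1 h2; omega
  | succ fuel ih =>
    intro lo hi ans v h1 h2 h3 hok
    have hsl : (segDyV v lo hi).length = hi - lo := segDyV_length v lo hi h3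
    by_cases hk : hi - lo = 1
    · -- the loop has terminated: a one-element segment
      have hget : (segDyV v lo hi)[(0:Nat)]? = some (v.getD lo 0) := by
        simpa using segDyV_getElem? v lo hi 0 (by omega) h3
      have hget0 : PySem.List.pyGet? (segDyV v lo hi) 0 = some (v.getD lo 0) := by
        have h := PySem.List.pyGet?_natCast (segDyV v lo hi) 0
        simp only [Nat.cast_zero] at h
        rw [h, hget]
      have hlt : lo < hi := by omega
      simp only [DyVGo, DyVLoopGo, hsl, hk, hget0]
      norm_num
      by_cases hd : (2:Int) ∣ (v[lo]?.getD 0)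
      · have h0 : v[lo]?.getD 0 % 2 = 0 := Int.emod_eq_zero_of_dvd hd
        simp [hlt, hd, h0]
      · have h1' : v[lo]?.getD 0 % 2 = 1 := by
          rcases Int.emod_two_eq (v[lo]?.getD 0) with h | h
          · exact absurd (Int.dvd_of_emod_eq_zero h) hd
          · exact h
        simp [hlt, hd, h1']
    · -- still descending: segment of width ≥ 2
      have hk2 : hi - lo > 1 := by omega
      have hm : PySem.Int.floordiv (((hi - lo) : Nat) : Int) 2 = (((hi - lo) / 2 : Nat) : Int) := by
        exact_mod_cast PySem.Int.floordiv_natCast (hi - lo) 2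
      have hget : PySem.List.pyGet? (segDyV v lo hi) ((((hi - lo) / 2 : Nat)) : Int) =
          some (v.getD (lo + (hi - lo) / 2) 0) := by
        rw [PySem.List.pyGet?_natCast, segDyV_getElem? v lo hi _ (by omega) h3]
      simp only [okDyVGo, hk2, if_true] at hok
      simp only [DyVGo, DyVLoopGo, hsl, hm, hget, hk2, if_true, if_neg hk]
      by_cases hpar : PySem.Int.mod (v.getD (lo + (hi - lo) / 2) 0) 2 = 0
      · -- even middle: record it and go right
        simp only [hpar, ne_eq, not_true_eq_false, if_false] at hok ⊢
        have hne2 : ¬ (hi - lo = 2) := by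
          intro h; rw [if_pos h] at hok; exact absurd hok (by decide)
        rw [if_neg hne2] at hok
        have hc : ((((hi - lo) / 2 : Nat)) : Int) + 1 = ((((hi - lo) / 2 + 1) : Nat) : Int) := by
          push_cast; ring
        have hslice : PySem.List.slice (segDyV v lo hi) (some (((((hi - lo) / 2 : Nat)) : Int) + 1))
            (some (((hi - lo) : Nat) : Int)) = segDyV v (lo + (hi - lo) / 2 + 1) hi := by
          rw [hc, PySem.List.slice_natCast, segDyV_drop]
          have he : lo + ((hi - lo) / 2 + 1) = lo + (hi - lo) / 2 + 1 := by omega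
          rw [he]
          refine List.take_of_length_le ?_
          rw [segDyV_length v _ hi (by omega)]
          omega
        rw [hslice]
        have hrec := ih (lo + (hi - lo) / 2 + 1) hi ((lo + (hi - lo) / 2 : Nat) : Int) v
          (by omega) (by omega) h3 hok
        rw [hrec]
        set p := DyVGo fuel (segDyV v (lo + (hi - lo) / 2 + 1) hi) with hpd
        rcases DyVGo_neg_one_or_nonneg fuel (segDyV v (lo + (hi - lo) / 2 + 1) hi) with hp | hp
        · rw [← hpd] at hp
          rw [if_pos hp, hp, if_pos rfl,
            if_neg (show ¬((((hi - lo) / 2 : Nat) : Int) = -1) from by omega)]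
          push_cast
          ring
        · rw [← hpd] at hp
          have hne : p ≠ -1 := by omega
          rw [if_neg hne, if_neg hne,
            if_neg (show ¬(p + (((hi - lo) / 2 : Nat) : Int) + 1 = -1) from by omega)]
          push_cast
          ring
      · -- odd middle: go left
        simp only [hpar, ne_eq, not_false_eq_true, if_true] at hok ⊢
        have hslice : PySem.List.slice (segDyV v lo hi) (some 0) (some ((((hi - lo) / 2 : Nat)) : Int)) =
            segDyV v lo (lo + (hi - lo) / 2) := by
          rw [PySem.List.slice_zero_start, PySem.List.slice_to_natCast,
            segDyV_take v lo hi _ (by omega)]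
        rw [hslice]
        exact ih lo (lo + (hi - lo) / 2) ans v (by omega) (by omega) (by omega) hok

theorem DyV_spec : Claim_equal_DyV := by
  intro v _ hpre
  have hlen : 0 < v.length := by
    by_contra h
    have hv : v = [] := List.length_eq_zero_iff.mp (by omega)
    rw [hv] at hpre
    exact absurd hpre (by decide)
  have := DyVLoopGo_eq_DyVGo_seg v.length 0 v.length (-1) v (by omega) (by omega) le_rfl hpre
  have hseg : segDyV v 0 v.length = v := by simp [segDyV]
  rw [hseg] at this
  show DyV v = DyV_alt v
  rw [DyV_alt, this, DyV]
  split <;> omega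

@[simp] theorem DyV_raises : Claim_raises_DyV := by
  unfold Claim_raises_DyV
  exact ⟨fun v _ hr hp => by rw [Raises_DyV] at hr; rw [Pre_DyV, hr] at hp; exact absurd hp (by decide), by decide⟩
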